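-- pv_equiv track=rewrite | github.com/Nghia03092004/nghia03092004.github.io | project_euler_unified/problem_305/solution.py | pos_of
-- ===== SOURCE A (Python) =====
-- def num_digits(m):
--     if m == 0:
--         return 1
--     d = 0
--     while m > 0:
--         d += 1
--         m //= 10
--     return d
--
-- def pos_of(m):
--     """Starting position of number m in the Champernowne string (1-indexed)."""
--     if m <= 0:
--         return 1
--     pos = 1
--     d = num_digits(m)
--     for i in range(1, d):
--         pos += 9 * i * (10 ** (i - 1))
--     pos += d * (m - 10 ** (d - 1))
--     return pos
-- ===== SOURCE B (Python) =====
-- def pos_of(m):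
--     """Starting position of number m in the Champernowne string (1-indexed)."""
--     if m <= 0:
--         return 1
--     d, p = 1, 1
--     while m >= 10 * p:
--         p *= 10
--         d += 1
--     return 1 + (d - 1) * p - (p - 1) // 9 + d * (m - p)
-- ===== Notes on version B (the rewrite author's own statement) =====
-- stated objective: simpler
-- what changed: B replaces A's divide-down digit-count loop plus the per-digit summation loop by a single multiply-up loop that yields the digit count d and the power p = 10**(d-1) together, and computes the digit-block offset sum in closed form as (d-1)*p - (p-1)//9.
import Mathlib
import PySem

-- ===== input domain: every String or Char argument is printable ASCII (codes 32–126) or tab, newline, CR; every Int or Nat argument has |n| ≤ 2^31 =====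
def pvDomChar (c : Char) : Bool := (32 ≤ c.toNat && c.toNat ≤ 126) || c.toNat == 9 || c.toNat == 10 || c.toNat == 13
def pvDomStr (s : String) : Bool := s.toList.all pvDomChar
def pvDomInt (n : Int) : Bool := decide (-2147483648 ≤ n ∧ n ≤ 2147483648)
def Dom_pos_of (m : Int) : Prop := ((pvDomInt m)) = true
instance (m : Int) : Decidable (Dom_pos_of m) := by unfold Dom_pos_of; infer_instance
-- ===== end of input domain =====

-- B replaces A's divide-down digit-count loop and per-digit summation loop by one
-- multiply-up loop giving d and p = 10^(d-1) together, plus the closed-form offset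
-- (d-1)*p - (p-1)//9; objective: simpler.


-- ===== PORT A =====
-- the 'while m > 0: d += 1; m //= 10' loop of num_digits
def numDigitsLoop (m : Int) (d : Int) : Int :=
  if h : 0 < m then numDigitsLoop (PySem.Int.floordiv m 10) (d + 1) else d
termination_by m.toNat
decreasing_by
  rw [PySem.Int.floordiv_eq_ediv_of_pos (by norm_num : (0:Int) < 10)]
  omega

def num_digits (m : Int) : Int :=
  if m = 0 then 1 else numDigitsLoop m 0

def pos_of (m : Int) : Int :=
  if m ≤ 0 then 1
  else
    let d := num_digits m
    let pos :=
      (PySem.List.pyRange 1 d 1).foldl (fun pos i => pos + 9 * i * 10 ^ (i - 1).toNat) 1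
    pos + d * (m - 10 ^ (d - 1).toNat)

-- ===== PORT B =====
-- the 'while m >= 10 * p: p *= 10; d += 1' loop of Source B (hp is a proof artifact for termination)
def dpLoop (m : Int) (d : Int) (p : Int) (hp : 0 < p) : Int × Int :=
  if h : 10 * p ≤ m then dpLoop m (d + 1) (p * 10) (by omega) else (d, p)
termination_by (m - p).toNat
decreasing_by omega

def pos_of_alt (m : Int) : Int :=
  if m ≤ 0 then 1
  else
    let dp := dpLoop m 1 1 (by norm_num)
    let d := dp.1
    let p := dp.2
    1 + (d - 1) * p - PySem.Int.floordiv (p - 1) 9 + d * (m - p)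

-- ===== PRECONDITION & SPEC =====
def Spec_pos_of (m : Int) (out : Int) : Prop := out = pos_of_alt m
instance (m : Int) (out : Int) : Decidable (Spec_pos_of m out) := by unfold Spec_pos_of; infer_instance

-- ===== CLAIM (what is proved, stated in full; the proofs are below) =====
def Claim_equal_pos_of : Prop := ∀ (m : Int), Dom_pos_of m → Spec_pos_of m (pos_of m)

-- ===== LEMMAS AND PROOFS =====

-- repunit: rep k = (10^k - 1) / 9, the value of the closed-form division in B
def rep (k : Nat) : Int :=
  match k with
  | 0 => 0
  | k + 1 => 10 * rep k + 1

theorem rep_nine (k : Nat) : 9 * rep k + 1 = 10 ^ k := by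
  induction k with
  | zero => simp [rep]
  | succ k ih => simp only [rep, pow_succ]; linarith

theorem numDigitsLoop_char (k : Nat) : ∀ (m acc : Int),
    10 ^ k ≤ m → m < 10 ^ (k + 1) → numDigitsLoop m acc = acc + k + 1 := by
  induction k with
  | zero =>
    intro m acc h1 h2
    simp only [pow_zero] at h1 h2
    rw [numDigitsLoop, dif_pos (by omega),
        PySem.Int.floordiv_eq_ediv_of_pos (by norm_num : (0:Int) < 10),
        numDigitsLoop, dif_neg (by omega)]
    simp
  | succ k ih =>
    intro m acc h1 h2
    have hpos : 0 < m := lt_of_lt_of_le (by positivity) h1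
    rw [numDigitsLoop, dif_pos hpos,
        PySem.Int.floordiv_eq_ediv_of_pos (by norm_num : (0:Int) < 10)]
    have hlo : (10:Int) ^ k ≤ m / 10 := by
      rw [Int.le_ediv_iff_mul_le (by norm_num)]
      calc (10:Int) ^ k * 10 = 10 ^ (k + 1) := by ring
        _ ≤ m := h1
    have hhi : m / 10 < (10:Int) ^ (k + 1) := by
      rw [Int.ediv_lt_iff_lt_mul (by norm_num)]
      calc m < 10 ^ (k + 2) := h2
        _ = (10:Int) ^ (k + 1) * 10 := by ring
    rw [ih (m / 10) (acc + 1) hlo hhi]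
    push_cast; ring

theorem dpLoop_char (k : Nat) : ∀ (m d p : Int) (hp : 0 < p),
    10 ^ k * p ≤ m → m < 10 ^ (k + 1) * p → dpLoop m d p hp = (d + k, 10 ^ k * p) := by
  induction k with
  | zero =>
    intro m d p hp h1 h2
    rw [dpLoop, dif_neg (by norm_num at h2; omega)]
    simp
  | succ k ih =>
    intro m d p hp h1 h2
    have h10 : (10:Int) * p ≤ m := by
      have : (10:Int) * p ≤ 10 ^ (k + 1) * p := by
        have : (10:Int) ≤ 10 ^ (k + 1) := by
          calc (10:Int) = 10 ^ 1 := by ring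
            _ ≤ 10 ^ (k + 1) := by
              apply pow_le_pow_right₀ (by norm_num) (by omega)
        exact mul_le_mul_of_nonneg_right this (le_of_lt hp)
      exact le_trans this h1
    rw [dpLoop, dif_pos h10,
        ih m (d + 1) (p * 10) (by omega)
          (by calc (10:Int) ^ k * (p * 10) = 10 ^ (k + 1) * p := by ring
                _ ≤ m := h1)
          (by calc m < 10 ^ (k + 2) * p := h2
                _ = (10:Int) ^ (k + 1) * (p * 10) := by ring)]
    simp only [Prod.mk.injEq]
    refine ⟨by push_cast; ring, by ring⟩

theorem sum_char (k : Nat) :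
    (PySem.List.pyRange 1 ((k:Int) + 1) 1).foldl
        (fun pos i => pos + 9 * i * 10 ^ (i - 1).toNat) 1
      = 1 + k * 10 ^ k - rep k := by
  induction k with
  | zero => simp [PySem.List.pyRange, rep]
  | succ k ih =>
    have hrange : PySem.List.pyRange 1 ((k:Int) + 1 + 1) 1
        = PySem.List.pyRange 1 ((k:Int) + 1) 1 ++ [(k:Int) + 1] := by
      exact PySem.List.pyRange_one_succ_right (by omega)
    rw [Nat.cast_add, Nat.cast_one, hrange, List.foldl_append, ih]
    simp only [List.foldl]
    have ht : ((k:Int) + 1 - 1).toNat = k := by omega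
    rw [ht]
    have h9 := rep_nine k
    simp only [rep]
    ring_nf
    ring_nf at h9
    nlinarith [h9]

theorem floordiv_rep (k : Nat) : PySem.Int.floordiv (10 ^ k - 1) 9 = rep k := by
  have h : (10:Int) ^ k - 1 = 9 * rep k := by linarith [rep_nine k]
  rw [PySem.Int.floordiv_eq_ediv_of_pos (by norm_num : (0:Int) < 9), h,
      Int.mul_ediv_cancel_left _ (by norm_num)]

-- ===== VERDICT (by name: the statement is the Claim_ definition above) =====
theorem pos_of_spec : Claim_equal_pos_of := by
  intro m _
  unfold Spec_pos_of pos_of pos_of_alt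
  by_cases hm : m ≤ 0
  · simp [hm]
  · have hpos : 0 < m := by omega
    simp only [if_neg hm]
    -- pick k with 10^k ≤ m < 10^(k+1)
    set k := Nat.log 10 m.toNat with hk
    have hmn : m.toNat ≠ 0 := by omega
    have h1n : 10 ^ k ≤ m.toNat := Nat.pow_log_le_self 10 hmn
    have h2n : m.toNat < 10 ^ (k + 1) := Nat.lt_pow_succ_log_self (by norm_num) _
    have h1 : (10:Int) ^ k ≤ m := by
      have := Int.ofNat_le.mpr h1n
      push_cast at this
      rwa [Int.toNat_of_nonneg (le_of_lt hpos)] at this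
    have h2 : m < (10:Int) ^ (k + 1) := by
      have := Int.ofNat_lt.mpr h2n
      push_cast at this
      rwa [Int.toNat_of_nonneg (le_of_lt hpos)] at this
    have hA : num_digits m = (k:Int) + 1 := by
      rw [num_digits, if_neg (by omega), numDigitsLoop_char k m 0 h1 h2]
      ring
    have hB : dpLoop m 1 1 (by norm_num) = (1 + (k:Int), 10 ^ k) := by
      rw [dpLoop_char k m 1 1 (by norm_num) (by simpa using h1) (by simpa using h2)]
      simp
    rw [hA, hB]
    have ht : ((k:Int) + 1 - 1).toNat = k := by omega
    rw [sum_char k]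
    simp only [ht]
    rw [show (1 + (k:Int) - 1) = (k:Int) by ring] -- normalize before floordiv
    rw [show ((10:Int) ^ k - 1) = (10 ^ k - 1) from rfl, floordiv_rep k]
    ring
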